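-- pv_equiv track=rewrite | github.com/bonnsistaken/machine-learing-lab1 | Ml_L2.py | label_encode
-- ===== SOURCE A (Python) =====
-- def label_encode(data):
--     # Dictionary to store label mappings
--     labels = {}
--     counter = 0  # Counter for assigning labels
--     encoded_data = []  # List to store encoded labels
--
--     for category in data:
--         if category not in labels:
--             labels[category] = counter  # Assign a new label
--             counter += 1
--         encoded_data.append(labels[category])
--
--     return encoded_data
-- ===== SOURCE B (Python) =====
-- def label_encode(data):
--     # A category's label equals the number of distinct categories that appear
--     # before its first occurrence; compute that directly for every element.
--     return [len(set(data[:data.index(c)])) for c in data]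
-- ===== Notes on version B (the rewrite author's own statement) =====
-- stated objective: alternative
-- what changed: B keeps no label table and no counter: each element's label is computed directly as the number of distinct categories preceding its first occurrence (data.index + slice + set), trading A's single stateful dict loop for a stateless per-element formula.
import Mathlib
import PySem

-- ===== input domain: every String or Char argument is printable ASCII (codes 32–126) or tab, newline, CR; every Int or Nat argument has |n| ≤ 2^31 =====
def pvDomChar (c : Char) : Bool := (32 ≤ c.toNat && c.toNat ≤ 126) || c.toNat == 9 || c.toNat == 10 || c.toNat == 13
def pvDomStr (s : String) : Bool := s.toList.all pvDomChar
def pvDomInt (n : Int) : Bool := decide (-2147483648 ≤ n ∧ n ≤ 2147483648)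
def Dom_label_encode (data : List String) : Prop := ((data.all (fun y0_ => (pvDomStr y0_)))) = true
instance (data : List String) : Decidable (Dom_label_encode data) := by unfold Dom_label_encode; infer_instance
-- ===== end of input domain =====

-- B keeps no label table and no counter: each element's label is the number of distinct
-- categories preceding its first occurrence, computed per element (alternative algorithm).

-- ===== PORT A =====
-- A's loop state: (labels dict, counter, encoded list)
def label_encode (data : List String) : List Int :=
  (data.foldl
    (fun (st : PySem.Dict String Int × Int × List Int) category =>
      let labels := st.1
      let counter := st.2.1
      let encoded := st.2.2
      let lc := if labels.contains category then (labels, counter)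
                else (labels.insert category counter, counter + 1)
      (lc.1, lc.2, encoded ++ [(lc.1.get? category).getD 0]))
    ((PySem.Dict.empty : PySem.Dict String Int), (0 : Int), ([] : List Int))).2.2

-- ===== PORT B =====
-- [len(set(data[:data.index(c)])) for c in data]
-- (data.index(c) always succeeds since c is drawn from data; .getD 0 is unreachable)
def label_encode_alt (data : List String) : List Int :=
  data.map (fun c =>
    PySem.Set.len (PySem.Set.ofList
      (PySem.List.slice data none (some (((PySem.List.index? data c).getD 0 : Nat) : Int)))))

-- ===== PRECONDITION & SPEC =====
def Spec_label_encode (data : List String) (out : List Int) : Prop := out = label_encode_alt data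
instance (data : List String) (out : List Int) : Decidable (Spec_label_encode data out) := by unfold Spec_label_encode; infer_instance

-- ===== CLAIM (what is proved, stated in full; the proofs are below) =====
def Claim_equal_label_encode : Prop := ∀ (data : List String), Dom_label_encode data → Spec_label_encode data (label_encode data)

-- ===== LEMMAS AND PROOFS =====

-- the label table A has built after seeing exactly the distinct categories u, in order
def pvMapOf (u : List String) : PySem.Dict String Int :=
  (PySem.List.enumerate u).foldl (fun d p => d.insert p.2 p.1) PySem.Dict.empty

theorem pvMapOf_snoc (u : List String) (c : String) :
    pvMapOf (u ++ [c]) = (pvMapOf u).insert c (u.length : Int) := by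
  simp [pvMapOf, PySem.List.enumerate_append, List.foldl_append, PySem.List.enumerate_cons]

theorem pvMapOf_contains (u : List String) (c : String) :
    (pvMapOf u).contains c = true ↔ c ∈ u := by
  induction u using List.reverseRecOn with
  | nil => simp [pvMapOf, PySem.List.enumerate, PySem.Dict.empty, PySem.Dict.contains]
  | append_singleton v x ih =>
    rw [pvMapOf_snoc]
    by_cases h : c = x
    · subst h
      simp [PySem.Dict.contains_eq_isSome_get?, PySem.Dict.get?_insert_self]
    · simp only [PySem.Dict.contains_eq_isSome_get?, PySem.Dict.get?_insert_of_ne _ _ h] at *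
      simp [ih, h]

-- appending elements not occurring in u does not change lookups of members of u
theorem pvMapOf_stable (u v : List String) (c : String)
    (hv : ∀ x ∈ v, x ∉ u) (hc : c ∈ u) :
    (pvMapOf (u ++ v)).get? c = (pvMapOf u).get? c := by
  induction v using List.reverseRecOn with
  | nil => simp
  | append_singleton w x ih =>
    have hx : x ∉ u := hv x (by simp)
    have hne : c ≠ x := fun h => hx (h ▸ hc)
    rw [← List.append_assoc, pvMapOf_snoc, PySem.Dict.get?_insert_of_ne _ _ hne]
    exact ih (fun y hy => hv y (by simp [hy]))

-- the ordered-dedup fold only appends fresh elements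
theorem pvAdd_decomp (d : List String) : ∀ (u : List String),
    ∃ v, d.foldl PySem.Set.add u = u ++ v ∧ ∀ x ∈ v, x ∉ u := by
  induction d with
  | nil => exact fun u => ⟨[], by simp⟩
  | cons c d ih =>
    intro u
    by_cases h : c ∈ u
    · obtain ⟨v, hv, hfresh⟩ := ih u
      refine ⟨v, ?_, hfresh⟩
      simpa [List.foldl_cons, PySem.Set.add, PySem.Set.contains, h] using hv
    · obtain ⟨v, hv, hfresh⟩ := ih (u ++ [c])
      refine ⟨c :: v, ?_, ?_⟩
      · simpa [List.foldl_cons, PySem.Set.add, PySem.Set.contains, h] using hv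
      · intro x hx
        simp only [List.mem_cons] at hx
        rcases hx with hx | hx
        · subst hx; exact h
        · intro hxu; exact hfresh x hx (by simp [hxu])

-- main loop invariant for A: the produced labels are lookups in the final table
theorem pvLoopA (d : List String) : ∀ (u : List String) (enc : List Int),
    (d.foldl
      (fun (st : PySem.Dict String Int × Int × List Int) category =>
        let labels := st.1
        let counter := st.2.1
        let encoded := st.2.2
        let lc := if labels.contains category then (labels, counter)
                  else (labels.insert category counter, counter + 1)
        (lc.1, lc.2, encoded ++ [(lc.1.get? category).getD 0]))
      (pvMapOf u, (u.length : Int), enc)).2.2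
    = enc ++ d.map (fun c => ((pvMapOf (d.foldl PySem.Set.add u)).get? c).getD 0) := by
  induction d with
  | nil => simp
  | cons c d ih =>
    intro u enc
    by_cases h : c ∈ u
    · have hcon : (pvMapOf u).contains c = true := (pvMapOf_contains u c).mpr h
      have hstep : d.foldl PySem.Set.add (PySem.Set.add u c) = d.foldl PySem.Set.add u := by
        simp [PySem.Set.add, PySem.Set.contains, h]
      obtain ⟨v, hv, hfresh⟩ := pvAdd_decomp d u
      have hget : (pvMapOf (d.foldl PySem.Set.add u)).get? c = (pvMapOf u).get? c := by
        rw [hv]; exact pvMapOf_stable u v c hfresh h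
      simp only [List.foldl_cons, List.map_cons, hcon, if_pos]
      rw [ih u]
      simp [hstep, hget]
    · have hcon : (pvMapOf u).contains c = false := by
        rw [Bool.eq_false_iff]
        exact fun hh => h ((pvMapOf_contains u c).mp hh)
      have hsnoc : (pvMapOf u).insert c (u.length : Int) = pvMapOf (u ++ [c]) :=
        (pvMapOf_snoc u c).symm
      have hstep : PySem.Set.add u c = u ++ [c] := by
        simp [PySem.Set.add, PySem.Set.contains, h]
      obtain ⟨v, hv, hfresh⟩ := pvAdd_decomp d (u ++ [c])
      have hget : (pvMapOf (d.foldl PySem.Set.add (u ++ [c]))).get? c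
          = (pvMapOf (u ++ [c])).get? c := by
        rw [hv]; exact pvMapOf_stable (u ++ [c]) v c hfresh (by simp)
      simp only [List.foldl_cons, List.map_cons, hcon, Bool.false_eq_true, if_false]
      have hlen : (u.length : Int) + 1 = ((u ++ [c]).length : Int) := by simp
      rw [hsnoc, hlen, ih (u ++ [c])]
      simp [hstep, hget]

-- A's label for c (a lookup in the final table) = B's distinct-count before c's
-- first occurrence, for any first-occurrence decomposition data = p ++ c :: s, c ∉ p
theorem pvElem (p s : List String) (c : String) (hcp : c ∉ p) :
    ((pvMapOf ((p ++ c :: s).foldl PySem.Set.add [])).get? c).getD 0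
      = ((PySem.Set.ofList p).length : Int) := by
  have hfold : (p ++ c :: s).foldl PySem.Set.add ([] : List String)
      = s.foldl PySem.Set.add (PySem.Set.add (PySem.Set.ofList p) c) := by
    simp [List.foldl_append, PySem.Set.ofList_eq_foldl, List.foldl_cons]
  have hcu : c ∉ PySem.Set.ofList p := fun h => hcp ((PySem.Set.mem_ofList p c).mp h)
  have hadd : PySem.Set.add (PySem.Set.ofList p) c = PySem.Set.ofList p ++ [c] := by
    simp [PySem.Set.add, PySem.Set.contains, hcu]
  obtain ⟨v, hv, hfresh⟩ := pvAdd_decomp s (PySem.Set.ofList p ++ [c])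
  rw [hfold, hadd, hv,
    pvMapOf_stable (PySem.Set.ofList p ++ [c]) v c hfresh (by simp),
    pvMapOf_snoc, PySem.Dict.get?_insert_self]
  rfl

-- ===== VERDICT (by name: the statement is the Claim_ definition above) =====
theorem label_encode_spec : Claim_equal_label_encode := by
  intro data _
  show label_encode data = label_encode_alt data
  have h := pvLoopA data [] []
  simp only [List.nil_append, List.length_nil, Nat.cast_zero] at h
  refine Eq.trans h ?_
  unfold label_encode_alt
  apply List.map_congr_left
  intro c hc
  have hsome : (PySem.List.index? data c).isSome :=
    (PySem.List.index?_isSome_iff data c).mpr hc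
  obtain ⟨k, hk⟩ := Option.isSome_iff_exists.mp hsome
  obtain ⟨p, s, hdata, hlen, hcp⟩ := (PySem.List.index?_eq_some_iff data c k).mp hk
  rw [hk]
  simp only [Option.getD_some]
  subst hlen
  rw [PySem.List.slice_to_natCast, hdata, List.take_left]
  exact pvElem p s c hcp
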